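-- pv_equiv track=rewrite | github.com/jsxgod/Python-coursework | kkd/lista7/comparator.py | files_difference
-- ===== SOURCE A (Python) =====
-- from math import ceil
--
-- def files_difference(file, file_):
--     bits1 = "".join(format(b, "08b") for b in file)
--     bits2 = "".join(format(b, "08b") for b in file_)
--
--     length_difference = ceil(abs(len(bits1) - len(bits2)) / 4)
--     result = length_difference
--     for i in range(0, len(bits1), 4):
--         if bits1[i:i+4] != bits2[i:i+4]:
--             result += 1
--
--     return result
-- ===== SOURCE B (Python) =====
-- def _chunks(data):
--     chunks, buf, n = [], "", 0
--     for b in data: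
--         for ch in format(b, "08b"):
--             buf += ch
--             n += 1
--             if len(buf) == 4:
--                 chunks.append(buf)
--                 buf = ""
--     if buf:
--         chunks.append(buf)
--     return chunks, n
--
--
-- def files_difference(file, file_):
--     c1, n1 = _chunks(file)
--     c2, n2 = _chunks(file_)
--     same = sum(a == b for a, b in zip(c1, c2))
--     return (abs(n1 - n2) + 3) // 4 + len(c1) - same
-- ===== Notes on version B (the rewrite author's own statement) =====
-- stated objective: alternative
-- what changed: B never builds or slices the two global bit strings: a streaming chunker folds each byte's bit characters into 4-character chunks as it goes, the mismatch count becomes len(chunks1) minus the number of equal chunks over zip(chunks1, chunks2), and the length-difference term is computed with integer arithmetic instead of float ceil.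
import Mathlib
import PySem

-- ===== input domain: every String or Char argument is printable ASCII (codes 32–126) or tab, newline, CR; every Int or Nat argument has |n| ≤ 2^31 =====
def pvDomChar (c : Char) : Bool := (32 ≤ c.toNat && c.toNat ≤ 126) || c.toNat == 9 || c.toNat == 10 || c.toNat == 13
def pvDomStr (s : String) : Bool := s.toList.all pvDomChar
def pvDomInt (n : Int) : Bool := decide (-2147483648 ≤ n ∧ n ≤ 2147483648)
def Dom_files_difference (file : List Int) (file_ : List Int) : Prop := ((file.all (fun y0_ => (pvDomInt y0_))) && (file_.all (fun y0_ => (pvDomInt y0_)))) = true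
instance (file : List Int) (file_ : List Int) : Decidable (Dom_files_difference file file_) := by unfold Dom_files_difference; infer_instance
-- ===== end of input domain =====

-- B replaces A's global bit-string building plus index/slice loop by a streaming 4-character
-- chunker and a zip pass counting equal chunks (objective: alternative decomposition).

-- ===== PORT A =====
-- format(b, "08b") ported by hand (PySem has no format): binary digits via Nat.toDigits 2
-- (exact: '0' for 0, no prefix), zero-padded to total width 8, '-' sign first for b < 0.
def pvFmt08b (b : Int) : List Char :=
  if b < 0 then
    let s := Nat.toDigits 2 (-b).toNat
    '-' :: (List.replicate (7 - s.length) '0' ++ s)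
  else
    let s := Nat.toDigits 2 b.toNat
    List.replicate (8 - s.length) '0' ++ s

-- ceil(abs(len1-len2)/4): Python computes it through an exact float (the magnitudes the checks
-- reach are far below 2^52), so it equals the integer ceiling (d+3)/4, ported as Nat arithmetic.
def files_difference (file : List Int) (file_ : List Int) : Int :=
  let bits1 : List Char := file.foldl (fun acc b => acc ++ pvFmt08b b) []
  let bits2 : List Char := file_.foldl (fun acc b => acc ++ pvFmt08b b) []
  let length_difference : Int :=
    (((((bits1.length : Int) - (bits2.length : Int)).natAbs + 3) / 4 : Nat) : Int)
  (PySem.List.pyRange 0 (bits1.length : Int) 4).foldl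
    (fun result i =>
      if PySem.List.slice bits1 (some i) (some (i + 4)) ≠
         PySem.List.slice bits2 (some i) (some (i + 4))
      then result + 1 else result)
    length_difference

-- ===== PORT B =====
-- one character pushed into the chunker state (chunks so far, buffer, characters seen)
def pvChunksCh (st : List (List Char) × List Char × Int) (ch : Char) :
    List (List Char) × List Char × Int :=
  let buf := st.2.1 ++ [ch]
  let n := st.2.2 + 1
  if buf.length = 4 then (st.1 ++ [buf], [], n) else (st.1, buf, n)

-- B's _chunks helper: 4-character chunks of the concatenated bit encodings, plus the bit count
def pvChunks (data : List Int) : List (List Char) × Int :=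
  let st := data.foldl (fun st b => (pvFmt08b b).foldl pvChunksCh st) ([], [], 0)
  (if st.2.1 ≠ [] then st.1 ++ [st.2.1] else st.1, st.2.2)

def files_difference_alt (file : List Int) (file_ : List Int) : Int :=
  let p1 := pvChunks file
  let p2 := pvChunks file_
  let same : Int := ((p1.1.zip p2.1).map (fun q => if q.1 = q.2 then (1 : Int) else 0)).sum
  PySem.Int.floordiv (((p1.2 - p2.2).natAbs : Int) + 3) 4 + (p1.1.length : Int) - same

-- ===== PRECONDITION & SPEC =====
def Spec_files_difference (file : List Int) (file_ : List Int) (out : Int) : Prop := out = files_difference_alt file file_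
instance (file : List Int) (file_ : List Int) (out : Int) : Decidable (Spec_files_difference file file_ out) := by unfold Spec_files_difference; infer_instance

-- ===== CLAIM (what is proved, stated in full; the proofs are below) =====
def Claim_equal_files_difference : Prop := ∀ (file : List Int) (file_ : List Int), Dom_files_difference file file_ → Spec_files_difference file file_ (files_difference file file_)

-- ===== LEMMAS AND PROOFS =====

-- the complete 4-chunks of a character stream and the incomplete remainder
def grpRem (l : List Char) : List (List Char) × List Char :=
  if 4 ≤ l.length then
    ((l.take 4) :: (grpRem (l.drop 4)).1, (grpRem (l.drop 4)).2)
  else ([], l)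
termination_by l.length
decreasing_by all_goals (simp; omega)

theorem grpRem_of_le {l : List Char} (h : 4 ≤ l.length) :
    grpRem l = ((l.take 4) :: (grpRem (l.drop 4)).1, (grpRem (l.drop 4)).2) := by
  rw [grpRem]; simp [h]

theorem grpRem_of_lt {l : List Char} (h : l.length < 4) : grpRem l = ([], l) := by
  rw [grpRem]; simp [Nat.not_le.mpr h]

-- all chunks of a stream, the incomplete remainder last
def pvCAll (l : List Char) : List (List Char) :=
  (grpRem l).1 ++ (if (grpRem l).2 ≠ [] then [(grpRem l).2] else [])

theorem pvCAll_of_le {l : List Char} (h : 4 ≤ l.length) :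
    pvCAll l = l.take 4 :: pvCAll (l.drop 4) := by
  unfold pvCAll
  rw [grpRem_of_le h]
  simp

theorem pvCAll_of_lt {l : List Char} (h : l.length < 4) :
    pvCAll l = if l ≠ [] then [l] else [] := by
  unfold pvCAll
  rw [grpRem_of_lt h]
  split_ifs <;> rfl

theorem pvCAll_len (l : List Char) : (pvCAll l).length = (l.length + 3) / 4 := by
  fun_induction grpRem l with
  | case1 l h ih =>
    rw [pvCAll_of_le h]
    have hd : (l.drop 4).length = l.length - 4 := by simp
    have : (pvCAll (l.drop 4)).length = ((l.drop 4).length + 3) / 4 := ih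
    rw [hd] at this
    simp only [List.length_cons, this]
    omega
  | case2 l h =>
    rw [pvCAll_of_lt (by omega)]
    split_ifs with hne
    · have : l.length ≠ 0 := by simpa using hne
      simp; omega
    · simp at hne; simp [hne]

theorem pvCAll_ne_nil (l : List Char) : ∀ x ∈ pvCAll l, x ≠ [] := by
  fun_induction grpRem l with
  | case1 l h ih =>
    rw [pvCAll_of_le h]
    intro x hx
    rcases List.mem_cons.mp hx with hx | hx
    · subst hx
      have : (l.take 4).length = 4 := by simp; omega
      intro hc; rw [hc] at this; simp at this
    · exact ih x hx
  | case2 l h =>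
    rw [pvCAll_of_lt (by omega)]
    intro x hx
    split_ifs at hx with hne
    · rcases List.mem_singleton.mp hx with rfl; exact hne
    · simp at hx

-- chunk k of a stream, [] past the end
def pvAt (c : List (List Char)) (k : Nat) : List Char := if h : k < c.length then c.get ⟨k, h⟩ else []

theorem pvAt_cons_zero (a : List Char) (c : List (List Char)) : pvAt (a :: c) 0 = a := by
  simp [pvAt]

theorem pvAt_cons_succ (a : List Char) (c : List (List Char)) (k : Nat) :
    pvAt (a :: c) (k + 1) = pvAt c k := by
  by_cases h : k < c.length <;> simp [pvAt, h]

theorem pvAt_succ (c : List (List Char)) (k : Nat) : pvAt c (k + 1) = pvAt c.tail k := by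
  cases c with
  | nil => simp [pvAt]
  | cons a c => simp [pvAt_cons_succ, List.tail_cons]

-- the slice bits[4k:4k+4] is chunk k
theorem take_drop_eq_pvAt : ∀ (k : Nat) (S : List Char),
    List.take 4 (List.drop (4 * k) S) = pvAt (pvCAll S) k := by
  intro k
  induction k with
  | zero =>
    intro S
    by_cases h : 4 ≤ S.length
    · rw [pvCAll_of_le h, pvAt_cons_zero]
      simp
    · rw [pvCAll_of_lt (by omega)]
      simp only [Nat.mul_zero, List.drop_zero]
      rw [List.take_of_length_le (by omega)]
      by_cases hne : S = []
      · simp [hne, pvAt]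
      · simp [hne, pvAt]
  | succ k ih =>
    intro S
    have hdr : List.drop (4 * (k + 1)) S = List.drop (4 * k) (S.drop 4) := by
      rw [List.drop_drop]
      congr 1
      omega
    rw [hdr]
    by_cases h : 4 ≤ S.length
    · rw [pvCAll_of_le h, pvAt_cons_succ, ih]
    · have hS4 : S.drop 4 = [] := by
        apply List.drop_eq_nil_of_le; omega
      rw [hS4, pvCAll_of_lt (by omega)]
      simp only [List.drop_nil, List.take_nil]
      by_cases hne : S = []
      · simp [hne, pvAt]
      · have hlen : ¬ (k + 1 < (if S = [] then ([] : List (List Char)) else [S]).length) := by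
          simp [hne]
        simp [pvAt, hne]

-- A's loop count, expressed over chunk lists
def pvG (c1 c2 : List (List Char)) : Nat :=
  (List.range c1.length).countP (fun k => decide (pvAt c1 k ≠ pvAt c2 k))

theorem pvG_nil (c2 : List (List Char)) : pvG [] c2 = 0 := by simp [pvG]

theorem pvG_cons (a : List Char) (c1 c2 : List (List Char)) :
    pvG (a :: c1) c2 = (if a ≠ pvAt c2 0 then 1 else 0) + pvG c1 c2.tail := by
  unfold pvG
  rw [List.length_cons, List.range_succ_eq_map, List.countP_cons, List.countP_map]
  have hcp : List.countP ((fun k => decide (pvAt (a :: c1) k ≠ pvAt c2 k)) ∘ Nat.succ)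
        (List.range c1.length)
      = List.countP (fun k => decide (pvAt c1 k ≠ pvAt c2.tail k)) (List.range c1.length) := by
    refine List.countP_congr ?_
    intro k _
    simp only [Function.comp_apply, pvAt_succ, List.tail_cons]
  rw [hcp, pvAt_cons_zero]
  by_cases h : a = pvAt c2 0
  · simp [h]
  · simp [h]; omega

-- the number of chunks that B counts as equal, in Nat
def pvE (c1 c2 : List (List Char)) : Nat :=
  ((c1.zip c2).map (fun q => if q.1 = q.2 then 1 else 0)).sum

theorem pvG_add_pvE : ∀ (c1 c2 : List (List Char)), (∀ x ∈ c1, x ≠ []) →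
    pvG c1 c2 + pvE c1 c2 = c1.length := by
  intro c1
  induction c1 with
  | nil => intro c2 _; simp [pvG_nil, pvE]
  | cons a c1 ih =>
    intro c2 hne
    have ha := hne a (by simp)
    have htl := fun x hx => hne x (List.mem_cons_of_mem _ hx)
    cases c2 with
    | nil =>
      rw [pvG_cons]
      have h0 : pvAt ([] : List (List Char)) 0 = [] := by simp [pvAt]
      rw [h0]
      simp only [List.tail_nil, pvE, List.zip_nil_right, List.map_nil, List.sum_nil,
        List.length_cons]
      have := ih [] htl
      simp only [pvE, List.zip_nil_right, List.map_nil, List.sum_nil] at this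
      simp [ha]
      omega
    | cons b c2 =>
      rw [pvG_cons, pvAt_cons_zero]
      simp only [List.tail_cons]
      have := ih c2 htl
      simp only [pvE, List.zip_cons_cons, List.map_cons, List.sum_cons, List.length_cons] at this ⊢
      by_cases hab : a = b <;> simp [hab] <;> omega

theorem pvE_cast (c1 c2 : List (List Char)) :
    ((c1.zip c2).map (fun q => if q.1 = q.2 then (1 : Int) else 0)).sum = (pvE c1 c2 : Int) := by
  induction c1 generalizing c2 with
  | nil => simp [pvE]
  | cons a c1 ih =>
    cases c2 with
    | nil => simp [pvE]
    | cons b c2 =>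
      simp only [List.zip_cons_cons, List.map_cons, List.sum_cons, pvE] at ih ⊢
      rw [ih c2]
      by_cases hab : a = b <;> simp [hab]

-- the streaming chunker state after a character stream
theorem chunk_fold : ∀ (cs : List Char) (ck : List (List Char)) (buf : List Char) (n : Int),
    buf.length < 4 →
    cs.foldl pvChunksCh (ck, buf, n)
      = (ck ++ (grpRem (buf ++ cs)).1, (grpRem (buf ++ cs)).2, n + cs.length) := by
  intro cs
  induction cs with
  | nil =>
    intro ck buf n h
    rw [List.foldl_nil, List.append_nil, grpRem_of_lt h]
    simp
  | cons ch cs ih =>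
    intro ck buf n h
    rw [List.foldl_cons]
    have hsplit : buf ++ ch :: cs = buf ++ [ch] ++ cs := by simp
    by_cases h4 : (buf ++ [ch]).length = 4
    · have hstep : pvChunksCh (ck, buf, n) ch = (ck ++ [buf ++ [ch]], [], n + 1) := by
        simp only [pvChunksCh]
        rw [if_pos h4]
      rw [hstep, ih _ _ _ (by simp)]
      simp only [List.nil_append]
      have hlen4 : 4 ≤ (buf ++ [ch] ++ cs).length := by simp at h4 ⊢; omega
      rw [hsplit, grpRem_of_le hlen4, List.take_left' h4, List.drop_left' h4]
      simp only [Prod.mk.injEq, List.length_cons]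
      exact ⟨by simp, trivial, by push_cast; ring⟩
    · have hstep : pvChunksCh (ck, buf, n) ch = (ck, buf ++ [ch], n + 1) := by
        simp only [pvChunksCh]
        rw [if_neg h4]
      rw [hstep, ih _ _ _ (by simp at h4 ⊢; omega), hsplit]
      simp only [Prod.mk.injEq, List.length_cons]
      exact ⟨trivial, trivial, by push_cast; ring⟩

-- B's _chunks computes exactly the chunk list and length of the concatenated encoding
theorem pvChunks_eq (data : List Int) :
    pvChunks data = (pvCAll (data.flatMap pvFmt08b), ((data.flatMap pvFmt08b).length : Int)) := by
  unfold pvChunks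
  rw [← List.foldl_flatMap, chunk_fold (data.flatMap pvFmt08b) [] [] 0 (by simp)]
  simp only [List.nil_append]
  unfold pvCAll
  by_cases hr : (grpRem (data.flatMap pvFmt08b)).2 = [] <;> simp [hr]

-- A's stride-4 loop over the bit string counts mismatching chunks
theorem loop_eqA (S1 S2 : List Char) (c : Int) :
    (PySem.List.pyRange 0 ((S1.length : Nat) : Int) 4).foldl
      (fun result i =>
        if PySem.List.slice S1 (some i) (some (i + 4)) ≠
           PySem.List.slice S2 (some i) (some (i + 4))
        then result + 1 else result) c
    = c + (pvG (pvCAll S1) (pvCAll S2) : Int) := by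
  rw [PySem.List.pyRange_of_pos 0 _ (by norm_num)]
  have hcount : (if (0:Int) < ((S1.length : Nat) : Int)
      then ((((S1.length : Nat) : Int) - 0 + 4 - 1) / 4).toNat else 0) = (pvCAll S1).length := by
    rw [pvCAll_len]
    split_ifs with h <;> omega
  rw [hcount, List.foldl_map]
  have hsl : ∀ (w : List Char) (k : Nat),
      PySem.List.slice w (some ((0:Int) + 4 * (k : Int)))
        (some ((0:Int) + 4 * (k : Int) + 4)) = pvAt (pvCAll w) k := by
    intro w k
    have hcast : (0 : Int) + 4 * (k : Int) = ((4 * k : Nat) : Int) := by push_cast; ring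
    have hcast2 : (0 : Int) + 4 * (k : Int) + 4 = ((4 * k + 4 : Nat) : Int) := by push_cast; ring
    rw [hcast2, hcast, PySem.List.slice_natCast]
    have h4 : 4 * k + 4 - 4 * k = 4 := by omega
    rw [h4, take_drop_eq_pvAt]
  simp only [hsl]
  rw [PySem.List.foldl_ite_add_one]
  rfl

-- ===== VERDICT (by name: the statement is the Claim_ definition above) =====
theorem files_difference_spec : Claim_equal_files_difference := by
  intro file file_ _
  unfold Spec_files_difference files_difference files_difference_alt
  simp only []
  rw [PySem.List.foldl_append_eq_flatMap, PySem.List.foldl_append_eq_flatMap,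
      List.nil_append, List.nil_append]
  rw [loop_eqA (file.flatMap pvFmt08b) (file_.flatMap pvFmt08b)]
  rw [pvChunks_eq file, pvChunks_eq file_]
  simp only []
  rw [pvE_cast]
  have hG := pvG_add_pvE (pvCAll (file.flatMap pvFmt08b)) (pvCAll (file_.flatMap pvFmt08b))
    (pvCAll_ne_nil _)
  rw [PySem.Int.floordiv_eq_ediv_of_pos (by norm_num)]
  have hlen1 := pvCAll_len (file.flatMap pvFmt08b)
  have hlen2 := pvCAll_len (file_.flatMap pvFmt08b)
  omega
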